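-- pv_equiv track=rewrite | github.com/naumovda/python | matrices.py | nonzero_col_count
-- ===== SOURCE A (Python) =====
-- def nonzero_col_count(matrix):
--     """
--     Return number of columns that do not contain zero elements
--     Parameters:
--         matrix: array
--             Input array (rectangular)
--     """
--     count = 0
--     row_count = len(matrix)
--     col_count = len(matrix[0])
--     for j in range(col_count):
--         zero = False
--         for i in range(row_count):
--             if matrix[i][j] == 0:
--                 zero = True
--                 break
--         if not zero:
--             count += 1
--     return count
-- ===== SOURCE B (Python) =====
-- def nonzero_col_count(matrix):
--     """
--     Return number of columns that do not contain zero elements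
--     (single row-major pass accumulating the set of columns that do contain a zero).
--     """
--     col_count = len(matrix[0])
--     zero_cols = set()
--     for row in matrix:
--         for j in range(col_count):
--             if row[j] == 0:
--                 zero_cols.add(j)
--     return col_count - len(zero_cols)
-- ===== Notes on version B (the rewrite author's own statement) =====
-- stated objective: alternative
-- what changed: Replaced the per-column scan with early break by a single row-major pass over all cells accumulating the set of columns containing a zero, returning col_count - len(zero_cols).
-- outside the precondition, e.g. on nonzero_col_count([[0], []]): A returns 0, B raises IndexError
import Mathlib
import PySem

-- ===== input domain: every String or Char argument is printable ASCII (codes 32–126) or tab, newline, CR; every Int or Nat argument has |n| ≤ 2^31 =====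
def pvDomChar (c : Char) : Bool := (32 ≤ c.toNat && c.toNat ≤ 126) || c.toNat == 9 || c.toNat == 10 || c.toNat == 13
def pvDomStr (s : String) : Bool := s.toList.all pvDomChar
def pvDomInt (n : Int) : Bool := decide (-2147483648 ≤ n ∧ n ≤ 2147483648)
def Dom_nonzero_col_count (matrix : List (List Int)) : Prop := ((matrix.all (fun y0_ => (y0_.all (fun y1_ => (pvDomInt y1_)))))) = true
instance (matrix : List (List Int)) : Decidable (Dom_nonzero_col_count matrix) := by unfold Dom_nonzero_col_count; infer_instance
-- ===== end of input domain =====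

-- B replaces A's per-column scan (with early break) by one row-major pass that accumulates the
-- set of columns containing a zero and subtracts its size; same cost, different decomposition.

-- ===== PORT A =====
-- inner loop 'for i in range(row_count): if matrix[i][j] == 0: zero = True; break':
-- i runs over row indices in order, so it is ported as structural recursion over the row list
-- with early return at the first zero (out-of-range access is excluded by Pre_).
def nczZero (rows : List (List Int)) (j : Nat) : Bool :=
  match rows with
  | [] => false
  | r :: rest => if r.getD j 1 == 0 then true else nczZero rest j

def nonzero_col_count (matrix : List (List Int)) : Int :=
  let col_count := (matrix.headD []).length
  (List.range col_count).foldl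
    (fun count j => if !nczZero matrix j then count + 1 else count) (0 : Int)

-- ===== PORT B =====
def nonzero_col_count_alt (matrix : List (List Int)) : Int :=
  let col_count := (matrix.headD []).length
  let zero_cols : PySem.Set Nat :=
    matrix.foldl
      (fun s row =>
        (List.range col_count).foldl
          (fun s j => if row.getD j 1 == 0 then PySem.Set.add s j else s) s)
      PySem.Set.empty
  (col_count : Int) - PySem.Set.len zero_cols

-- ===== PRECONDITION & SPEC =====
-- Pre_ excludes the empty matrix (A raises IndexError on matrix[0]) and ragged matrices with a
-- row shorter than the first row: there A raises IndexError on matrix[i][j] unless an earlier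
-- zero in the column happens to break first, and B (scanning every cell) raises as well.
def Pre_nonzero_col_count (matrix : List (List Int)) : Prop :=
  matrix ≠ [] ∧ ∀ row ∈ matrix, (matrix.headD []).length ≤ row.length
instance (matrix : List (List Int)) : Decidable (Pre_nonzero_col_count matrix) := by
  unfold Pre_nonzero_col_count; infer_instance

def pvWitness_nonzero_col_count : List (List Int) := [[1, 0, 2], [3, 4, 5]]

def Spec_nonzero_col_count (matrix : List (List Int)) (out : Int) : Prop := out = nonzero_col_count_alt matrix
instance (matrix : List (List Int)) (out : Int) : Decidable (Spec_nonzero_col_count matrix out) := by unfold Spec_nonzero_col_count; infer_instance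

-- ===== CLAIM (what is proved, stated in full; the proofs are below) =====
def Claim_equal_nonzero_col_count : Prop := ∀ (matrix : List (List Int)), Dom_nonzero_col_count matrix → Pre_nonzero_col_count matrix → Spec_nonzero_col_count matrix (nonzero_col_count matrix)

-- ===== LEMMAS AND PROOFS =====

-- A's inner break-loop decides "some row has a zero in column j"
theorem nczZero_eq_any (rows : List (List Int)) (j : Nat) :
    nczZero rows j = rows.any (fun r => r.getD j 1 == 0) := by
  induction rows with
  | nil => rfl
  | cons r rest ih =>
      rw [nczZero, List.any_cons, ← ih]
      by_cases h : (r.getD j 1 == 0) = true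
      · rw [if_pos h, h, Bool.true_or]
      · rw [if_neg h, Bool.eq_false_iff.mpr h, Bool.false_or]

-- membership after B's inner (per-row) fold
theorem mem_inner_fold (row : List Int) (l : List Nat) (s : PySem.Set Nat) (x : Nat) :
    x ∈ l.foldl (fun s j => if row.getD j 1 == 0 then PySem.Set.add s j else s) s ↔
      x ∈ s ∨ (x ∈ l ∧ (row.getD x 1 == 0) = true) := by
  induction l generalizing s with
  | nil => simp
  | cons j rest ih =>
      rw [List.foldl_cons]
      by_cases h : (row.getD j 1 == 0) = true
      · rw [if_pos h, ih, PySem.Set.mem_add, List.mem_cons]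
        constructor
        · rintro ((hs | rfl) | ⟨hm, hz⟩)
          · exact Or.inl hs
          · exact Or.inr ⟨Or.inl rfl, h⟩
          · exact Or.inr ⟨Or.inr hm, hz⟩
        · rintro (hs | ⟨(rfl | hm), hz⟩)
          · exact Or.inl (Or.inl hs)
          · exact Or.inl (Or.inr rfl)
          · exact Or.inr ⟨hm, hz⟩
      · rw [if_neg h, ih, List.mem_cons]
        constructor
        · rintro (hs | ⟨hm, hz⟩)
          · exact Or.inl hs
          · exact Or.inr ⟨Or.inr hm, hz⟩
        · rintro (hs | ⟨(rfl | hm), hz⟩)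
          · exact Or.inl hs
          · exact absurd hz h
          · exact Or.inr ⟨hm, hz⟩

theorem nodup_inner_fold (row : List Int) (l : List Nat) (s : PySem.Set Nat)
    (hs : s.Nodup) :
    (l.foldl (fun s j => if row.getD j 1 == 0 then PySem.Set.add s j else s) s).Nodup := by
  induction l generalizing s with
  | nil => exact hs
  | cons j rest ih =>
      rw [List.foldl_cons]
      by_cases h : (row.getD j 1 == 0) = true
      · rw [if_pos h]; exact ih _ (PySem.Set.nodup_add s j hs)
      · rw [if_neg h]; exact ih _ hs

-- membership after B's full (row-major) fold
theorem mem_outer_fold (rows : List (List Int)) (c : Nat) (s : PySem.Set Nat) (x : Nat) :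
    x ∈ rows.foldl
        (fun s row => (List.range c).foldl
          (fun s j => if row.getD j 1 == 0 then PySem.Set.add s j else s) s) s ↔
      x ∈ s ∨ (x < c ∧ (rows.any (fun r => r.getD x 1 == 0)) = true) := by
  induction rows generalizing s with
  | nil => simp
  | cons r rest ih =>
      rw [List.foldl_cons, ih, mem_inner_fold, List.mem_range, List.any_cons,
        Bool.or_eq_true]
      tauto

theorem nodup_outer_fold (rows : List (List Int)) (c : Nat) (s : PySem.Set Nat)
    (hs : s.Nodup) :
    (rows.foldl
        (fun s row => (List.range c).foldl
          (fun s j => if row.getD j 1 == 0 then PySem.Set.add s j else s) s) s).Nodup := by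
  induction rows generalizing s with
  | nil => exact hs
  | cons r rest ih =>
      exact ih _ (nodup_inner_fold r (List.range c) s hs)

-- B's zero-column set is (as a set) the filter of the column range by "column has a zero"
theorem length_zero_cols (matrix : List (List Int)) (c : Nat) :
    (matrix.foldl
        (fun s row => (List.range c).foldl
          (fun s j => if row.getD j 1 == 0 then PySem.Set.add s j else s) s)
        PySem.Set.empty).length =
      ((List.range c).filter (fun j => matrix.any (fun r => r.getD j 1 == 0))).length := by
  apply List.Perm.length_eq
  rw [List.perm_ext_iff_of_nodup
    (nodup_outer_fold matrix c PySem.Set.empty List.nodup_nil)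
    ((List.nodup_range).filter _)]
  intro x
  rw [mem_outer_fold, List.mem_filter, List.mem_range]
  simp [PySem.Set.empty]

theorem nonzero_col_count_spec' (matrix : List (List Int)) :
    nonzero_col_count matrix = nonzero_col_count_alt matrix := by
  unfold nonzero_col_count nonzero_col_count_alt
  set c := (matrix.headD []).length with hc
  rw [PySem.List.foldl_count_if (fun j => !nczZero matrix j) (List.range c) 0]
  simp only [PySem.Set.len]
  rw [length_zero_cols matrix c]
  have hsplit :
      ((List.range c).filter (fun j => matrix.any (fun r => r.getD j 1 == 0))).length +
        ((List.range c).filter (fun j => !matrix.any (fun r => r.getD j 1 == 0))).length = c := by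
    have h := List.length_eq_length_filter_add (l := List.range c)
      (fun j => matrix.any (fun r => r.getD j 1 == 0))
    simp only [List.length_range] at h
    omega
  have hcount : (List.range c).countP (fun j => !nczZero matrix j) =
      ((List.range c).filter (fun j => !matrix.any (fun r => r.getD j 1 == 0))).length := by
    rw [← List.countP_eq_length_filter]
    apply List.countP_congr
    intro j _
    rw [nczZero_eq_any]
  rw [hcount]
  omega

-- ===== VERDICT (by name: the statement is the Claim_ definition above) =====
theorem nonzero_col_count_spec : Claim_equal_nonzero_col_count := by
  intro matrix _ _
  exact nonzero_col_count_spec' matrix
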